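-- pv_equiv track=rewrite | github.com/motivated-learning/Cellular_Automata_Donation_Game | celural_automata_evolution.py | swap_odd_list_elements
-- ===== SOURCE A (Python) =====
-- def swap_odd_list_elements(list_of_elements):
--     odd_values = [list_of_elements[i] for i in range(len(list_of_elements)) if i % 2 != 0]
--
--     for i, item in enumerate(odd_values):
--         if (2 * i + 3) < len(list_of_elements):
--             list_of_elements[2 * i + 3] = item
--         else:
--             list_of_elements[1] = item
--     return list_of_elements
-- ===== SOURCE B (Python) =====
-- def swap_odd_list_elements(list_of_elements):
--     odds = list_of_elements[1::2]
--     list_of_elements[1::2] = odds[-1:] + odds[:-1]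
--     return list_of_elements
-- ===== Notes on version B (the rewrite author's own statement) =====
-- stated objective: simpler
-- what changed: Replaces the per-element index-arithmetic loop with its wrap-around else branch by extracting the odd-position slice, rotating it right via empty-safe slice concatenation odds[-1:]+odds[:-1], and writing it back with one slice assignment.
import Mathlib
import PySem

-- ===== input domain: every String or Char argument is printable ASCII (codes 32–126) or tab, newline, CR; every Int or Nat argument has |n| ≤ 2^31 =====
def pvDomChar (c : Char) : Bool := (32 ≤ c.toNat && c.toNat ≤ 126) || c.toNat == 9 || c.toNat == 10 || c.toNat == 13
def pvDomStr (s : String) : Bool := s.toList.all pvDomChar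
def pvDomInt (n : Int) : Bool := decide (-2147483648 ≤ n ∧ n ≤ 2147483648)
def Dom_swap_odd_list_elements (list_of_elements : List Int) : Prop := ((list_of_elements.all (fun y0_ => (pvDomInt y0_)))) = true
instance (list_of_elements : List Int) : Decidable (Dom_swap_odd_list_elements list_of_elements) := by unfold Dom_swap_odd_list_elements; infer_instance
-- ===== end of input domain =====

-- B rewrites A's index-arithmetic loop (with its wrap-around else branch) as slice extraction +
-- rotate + slice write-back (objective: simpler). Both Pythons mutate the argument in place the
-- same way; the equivalence proved here is about the returned value.

-- ===== PORT A =====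
-- Lean's Int % matches Python's % for the positive divisor 2; every index assignment A performs
-- is in range (2*i+3 < len by the guard, and index 1 exists whenever odd_values ≠ []), so the
-- total pySetD is exact here.
def swap_odd_list_elements (list_of_elements : List Int) : List Int :=
  let odd_values :=
    ((PySem.List.pyRange 0 list_of_elements.length 1).filter
        (fun i => ¬ i % 2 = 0)).map
      (fun i => PySem.List.pyGetD list_of_elements i 0)
  (PySem.List.enumerate odd_values 0).foldl
    (fun acc p =>
      if 2 * p.1 + 3 < (acc.length : Int) then PySem.List.pySetD acc (2 * p.1 + 3) p.2
      else PySem.List.pySetD acc 1 p.2)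
    list_of_elements

-- ===== PORT B =====
-- hand port of the step-2 slice `list_of_elements[1::2]`, exact on any list (PySem.List.slice?
-- covers it but offers no step-2 lemmas): the elements at odd indices, in order.
def pvOddSlice : List Int → List Int
  | _ :: b :: t => b :: pvOddSlice t
  | _ => []

-- hand port of the slice assignment `list_of_elements[1::2] = vs` (lengths agree at the call
-- site, as Python requires): replaces the elements at odd indices by vs, in order.
def pvWriteOddSlice : List Int → List Int → List Int
  | a :: _ :: t, v :: vs => a :: v :: pvWriteOddSlice t vs
  | xs, _ => xs

def swap_odd_list_elements_alt (list_of_elements : List Int) : List Int :=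
  let odds := pvOddSlice list_of_elements
  -- odds[-1:] + odds[:-1]
  pvWriteOddSlice list_of_elements (odds.drop (odds.length - 1) ++ odds.dropLast)

-- ===== PRECONDITION & SPEC =====
def Spec_swap_odd_list_elements (list_of_elements : List Int) (out : List Int) : Prop := out = swap_odd_list_elements_alt list_of_elements
instance (list_of_elements : List Int) (out : List Int) : Decidable (Spec_swap_odd_list_elements list_of_elements out) := by unfold Spec_swap_odd_list_elements; infer_instance

-- ===== CLAIM (what is proved, stated in full; the proofs are below) =====
def Claim_equal_swap_odd_list_elements : Prop := ∀ (list_of_elements : List Int), Dom_swap_odd_list_elements list_of_elements → Spec_swap_odd_list_elements list_of_elements (swap_odd_list_elements list_of_elements)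

-- ===== LEMMAS AND PROOFS =====

theorem pvOddSlice_length (l : List Int) : (pvOddSlice l).length = l.length / 2 := by
  induction l using pvOddSlice.induct with
  | case1 a b t ih => simp [pvOddSlice, ih]; omega
  | case2 l h => cases l with
    | nil => simp [pvOddSlice]
    | cons a t => cases t with
      | nil => simp [pvOddSlice]
      | cons b t => exact absurd rfl (h a b t)

theorem pvOddSlice_getD (l : List Int) : ∀ (i : Nat),
    (pvOddSlice l).getD i 0 = if i < l.length / 2 then l.getD (2 * i + 1) 0 else 0 := by
  induction l using pvOddSlice.induct with
  | case1 a b t ih =>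
    intro i
    cases i with
    | zero => simp [pvOddSlice]
    | succ j =>
      rw [show pvOddSlice (a :: b :: t) = b :: pvOddSlice t from rfl, List.getD_cons_succ, ih j,
        show 2 * (j + 1) + 1 = (2 * j + 1) + 1 + 1 from by ring, List.getD_cons_succ,
        List.getD_cons_succ]
      simp only [List.length_cons]
      split_ifs with h1 h2 <;> first | rfl | (exfalso; omega)
  | case2 l h =>
    intro i
    cases l with
    | nil => simp [pvOddSlice]
    | cons a t => cases t with
      | nil => simp [pvOddSlice]
      | cons b t => exact absurd rfl (h a b t)

-- the filtered index list of A's comprehension, in closed form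
theorem range_filter_odd (n : Nat) :
    ((PySem.List.pyRange 0 (n : Int) 1).filter (fun i => decide (¬ i % 2 = 0)))
      = (List.range (n / 2)).map (fun k : Nat => 2 * (k : Int) + 1) := by
  induction n with
  | zero => simp
  | succ m ih =>
    rw [show ((m + 1 : Nat) : Int) = (m : Int) + 1 from by push_cast; ring,
      PySem.List.pyRange_one_succ_right (by exact_mod_cast Int.natCast_nonneg m),
      List.filter_append, ih]
    by_cases hm : m % 2 = 1
    · have h1 : (m + 1) / 2 = m / 2 + 1 := by omega
      have h2 : List.filter (fun i => decide (¬ i % 2 = 0)) [(m : Int)] = [(m : Int)] := by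
        simp
        omega
      rw [h1, List.range_succ, List.map_append, h2]
      congr 1
      simp
      omega
    · have h1 : (m + 1) / 2 = m / 2 := by omega
      have h2 : ((m : Int)) % 2 = 0 := by omega
      rw [h1]
      simp [h2]

-- A's odd_values equal B's odds
theorem odd_values_eq (l : List Int) :
    ((PySem.List.pyRange 0 (l.length : Int) 1).filter (fun i => decide (¬ i % 2 = 0))).map
        (fun i => PySem.List.pyGetD l i 0)
      = pvOddSlice l := by
  rw [range_filter_odd, List.map_map]
  refine List.ext_getElem (by simp [pvOddSlice_length]) ?_
  intro i h1 h2
  rw [List.getElem_map, List.getElem_range]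
  simp only [Function.comp_apply]
  rw [show (2 * ((i : Nat) : Int) + 1) = (((2 * i + 1 : Nat)) : Int) from by push_cast; ring,
    PySem.List.pyGetD_natCast]
  have hi : i < l.length / 2 := by simpa [pvOddSlice_length] using h2
  rw [← List.getD_eq_getElem (pvOddSlice l) 0 h2, pvOddSlice_getD, if_pos hi]

theorem pvWriteOddSlice_length (l vs : List Int) : (pvWriteOddSlice l vs).length = l.length := by
  induction l, vs using pvWriteOddSlice.induct with
  | case1 a b t v vs ih => simp [pvWriteOddSlice, ih]
  | case2 xs vs h => cases xs with
    | nil => simp [pvWriteOddSlice]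
    | cons a t => cases t with
      | nil => simp [pvWriteOddSlice]
      | cons b t => cases vs with
        | nil => simp [pvWriteOddSlice]
        | cons v vs => exact (h a b t v vs rfl rfl).elim

theorem pvWriteOddSlice_getD (l vs : List Int) : ∀ (p : Nat), p < l.length →
    (pvWriteOddSlice l vs).getD p 0 =
      if p % 2 = 1 ∧ p / 2 < vs.length then vs.getD (p / 2) 0 else l.getD p 0 := by
  induction l, vs using pvWriteOddSlice.induct with
  | case1 a b t v vs ih =>
    intro p hp
    match p with
    | 0 => simp [pvWriteOddSlice]
    | 1 => simp [pvWriteOddSlice]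
    | (q + 2) =>
      rw [show pvWriteOddSlice (a :: b :: t) (v :: vs) = a :: v :: pvWriteOddSlice t vs from rfl,
        List.getD_cons_succ, List.getD_cons_succ, ih q (by simp at hp; omega),
        show ((a :: b :: t).getD (q + 2) 0) = t.getD q 0 from by simp]
      have h1 : (q + 2) % 2 = q % 2 := by omega
      have h2 : (q + 2) / 2 = q / 2 + 1 := by omega
      rw [h1, h2]
      by_cases hq : q % 2 = 1 ∧ q / 2 < vs.length
      · simp [hq]
      · have h3 : ¬ (q % 2 = 1 ∧ q / 2 + 1 < (v :: vs).length) := by simp at hq ⊢; omega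
        rw [if_neg hq, if_neg h3]
  | case2 xs vs h =>
    intro p hp
    cases xs with
    | nil => simp at hp
    | cons a t => cases t with
      | nil =>
        have : p = 0 := by simp at hp; omega
        subst this
        simp [pvWriteOddSlice]
      | cons b t => cases vs with
        | nil => simp [pvWriteOddSlice]
        | cons v vs => exact (h a b t v vs rfl rfl).elim

theorem pvWriteOddSlice_nil (l : List Int) : pvWriteOddSlice l [] = l := by
  cases l with
  | nil => rfl
  | cons a t => cases t <;> rfl

-- the loop body of A, named for the lemmas (definitionally the port's lambda)
def pvStepA (acc : List Int) (p : Int × Int) : List Int :=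
  if 2 * p.1 + 3 < (acc.length : Int) then PySem.List.pySetD acc (2 * p.1 + 3) p.2
  else PySem.List.pySetD acc 1 p.2

-- the middle iterations of A's loop (all guards true): pure scattered writes
theorem fold_mid (ws m : List Int) (h : 2 * ws.length + 1 < m.length) :
    ((PySem.List.enumerate ws 0).foldl pvStepA m).length = m.length ∧
    ∀ p : Nat, ((PySem.List.enumerate ws 0).foldl pvStepA m).getD p 0 =
      if p % 2 = 1 ∧ 3 ≤ p ∧ p < 2 * ws.length + 3 then ws.getD ((p - 3) / 2) 0
      else m.getD p 0 := by
  induction ws using List.reverseRecOn with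
  | nil =>
    refine ⟨by simp [PySem.List.enumerate], ?_⟩
    intro p
    simp [PySem.List.enumerate]
  | append_singleton ws w ih =>
    have hlen : 2 * ws.length + 1 < m.length := by simp at h; omega
    obtain ⟨ihlen, ihget⟩ := ih hlen
    rw [PySem.List.enumerate_append, List.foldl_append]
    set r := (PySem.List.enumerate ws 0).foldl pvStepA m with hr
    have henum : PySem.List.enumerate [w] (0 + (ws.length : Int)) = [((ws.length : Int), w)] := by
      simp [PySem.List.enumerate]
    rw [henum]
    simp only [List.foldl_cons, List.foldl_nil]
    have hcond : 2 * ((ws.length : Int)) + 3 < ((r.length : Int)) := by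
      rw [ihlen]; simp at h; omega
    have hstep : pvStepA r ((ws.length : Int), w) = r.set (2 * ws.length + 3) w := by
      rw [pvStepA]
      simp only [if_pos hcond]
      rw [show (2 * ((ws.length : Int)) + 3) = ((2 * ws.length + 3 : Nat) : Int) from by
        push_cast; ring, PySem.List.pySetD_natCast]
    rw [hstep]
    refine ⟨by simp [ihlen], ?_⟩
    intro p
    by_cases hp : p = 2 * ws.length + 3
    · subst hp
      have hlt : 2 * ws.length + 3 < r.length := by rw [ihlen]; simp at h; omega
      rw [List.getD_eq_getElem _ _ (by simpa using hlt), List.getElem_set]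
      have hcnd : (2 * ws.length + 3) % 2 = 1 ∧ 3 ≤ 2 * ws.length + 3 ∧
          2 * ws.length + 3 < 2 * (ws ++ [w]).length + 3 := by simp
      rw [if_pos hcnd, if_pos rfl]
      have h4 : (2 * ws.length + 3 - 3) / 2 = ws.length := by omega
      rw [h4, List.getD_eq_getElem _ _ (by simp), List.getElem_append_right (by simp)]
      simp
    · have hget : (r.set (2 * ws.length + 3) w).getD p 0 = r.getD p 0 := by
        rcases Nat.lt_or_ge p r.length with hlt | hge
        · rw [List.getD_eq_getElem _ _ (by simpa using hlt),
            List.getD_eq_getElem _ _ hlt, List.getElem_set, if_neg (by omega)]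
        · rw [List.getD_eq_default _ _ (by simpa using hge), List.getD_eq_default _ _ hge]
      rw [hget, ihget p]
      by_cases hc : p % 2 = 1 ∧ 3 ≤ p ∧ p < 2 * ws.length + 3
      · have hc' : p % 2 = 1 ∧ 3 ≤ p ∧ p < 2 * (ws ++ [w]).length + 3 := by
          simp; constructor; exact hc.1; omega
        rw [if_pos hc, if_pos hc']
        have hidx : (p - 3) / 2 < ws.length := by omega
        rw [List.getD_eq_getElem _ _ hidx, List.getD_eq_getElem _ _ (by simp; omega),
          List.getElem_append_left hidx]
      · have hc' : ¬ (p % 2 = 1 ∧ 3 ≤ p ∧ p < 2 * (ws ++ [w]).length + 3) := by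
          simp at hc ⊢
          intro h1 h2
          omega
        rw [if_neg hc, if_neg hc']

theorem ports_agree (l : List Int) :
    swap_odd_list_elements l = swap_odd_list_elements_alt l := by
  have hA : swap_odd_list_elements l
      = (PySem.List.enumerate (pvOddSlice l) 0).foldl pvStepA l := by
    unfold swap_odd_list_elements
    rw [odd_values_eq l]
    rfl
  have hk := pvOddSlice_length l
  set os := pvOddSlice l with hos
  set k := os.length with hkk
  have hB : swap_odd_list_elements_alt l
      = pvWriteOddSlice l (os.drop (k - 1) ++ os.dropLast) := rfl
  rw [hB]
  by_cases hk0 : k = 0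
  · have : os = [] := List.length_eq_zero_iff.mp (by omega)
    rw [hA, this]
    simp [PySem.List.enumerate, pvWriteOddSlice_nil]
  · -- k ≥ 1, hence l.length ≥ 2
    have hn2 : 2 ≤ l.length := by omega
    have hos_ne : os ≠ [] := by intro h; rw [h] at hkk; simp at hkk; omega
    -- split the loop: all iterations but the last, then the final wrap-around write
    have hsplit : os = os.dropLast ++ [os.getLast hos_ne] := (List.dropLast_append_getLast hos_ne).symm
    have hdl : os.dropLast.length = k - 1 := by simp [hkk]
    obtain ⟨hmlen, hmget⟩ := fold_mid os.dropLast l (by rw [hdl]; omega)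
    set r := (PySem.List.enumerate os.dropLast 0).foldl pvStepA l with hrr
    have hAr : swap_odd_list_elements l = r.set 1 (os.getLast hos_ne) := by
      rw [hA]
      conv_lhs => rw [hsplit]
      rw [PySem.List.enumerate_append, List.foldl_append, ← hrr]
      have henum : PySem.List.enumerate [os.getLast hos_ne] (0 + (os.dropLast.length : Int))
          = [((os.dropLast.length : Int), os.getLast hos_ne)] := by
        simp [PySem.List.enumerate]
      rw [henum]
      simp only [List.foldl_cons, List.foldl_nil]
      show pvStepA r _ = _
      rw [pvStepA]
      have hcond : ¬ (2 * ((os.dropLast.length : Int)) + 3 < ((r.length : Int))) := by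
        rw [hmlen, hdl]; omega
      rw [if_neg hcond, show ((1 : Int)) = (((1 : Nat)) : Int) from rfl, PySem.List.pySetD_natCast]
    rw [hAr]
    -- now compare element by element
    set rot := os.drop (k - 1) ++ os.dropLast with hrot
    have hrotlen : rot.length = k := by simp [hrot]; omega
    refine List.ext_getElem (by rw [List.length_set, hmlen, pvWriteOddSlice_length]) ?_
    intro p hp1 hp2
    have hpn : p < l.length := by rwa [List.length_set, hmlen] at hp1
    rw [← List.getD_eq_getElem _ 0 hp1, ← List.getD_eq_getElem _ 0 hp2,
      pvWriteOddSlice_getD l rot p hpn]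
    by_cases hp1' : p = 1
    · subst hp1'
      have h1r : 1 < r.length := by rw [hmlen]; omega
      rw [List.getD_eq_getElem _ _ (by simpa using h1r), List.getElem_set, if_pos rfl]
      have hcnd : 1 % 2 = 1 ∧ 1 / 2 < rot.length := ⟨rfl, by rw [hrotlen]; omega⟩
      rw [if_pos hcnd]
      have hdrop : (k - 1) + 0 < os.length := by omega
      rw [show (1 : Nat) / 2 = 0 from rfl, List.getD_eq_getElem _ _ (by rw [hrotlen]; omega),
        List.getElem_append_left (by simp [hkk]; omega), List.getElem_drop]
      rw [List.getLast_eq_getElem]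
      congr 1
    · have hset : (r.set 1 (os.getLast hos_ne)).getD p 0 = r.getD p 0 := by
        rcases Nat.lt_or_ge p r.length with hlt | hge
        · rw [List.getD_eq_getElem _ _ (by simpa using hlt),
            List.getD_eq_getElem _ _ hlt, List.getElem_set, if_neg (by omega)]
        · rw [List.getD_eq_default _ _ (by simpa using hge), List.getD_eq_default _ _ hge]
      rw [hset, hmget p, hdl]
      by_cases hodd : p % 2 = 1
      · -- odd p ≥ 3: both sides read the (p-3)/2-th element of os.dropLast
        have hp3 : 3 ≤ p := by omega
        have hpk : p < 2 * k + 1 := by omega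
        have hcA : p % 2 = 1 ∧ 3 ≤ p ∧ p < 2 * (k - 1) + 3 := by
          refine ⟨hodd, hp3, by omega⟩
        have hcB : p % 2 = 1 ∧ p / 2 < rot.length := by
          refine ⟨hodd, by rw [hrotlen]; omega⟩
        rw [if_pos hcA, if_pos hcB]
        have hi1 : (p - 3) / 2 < os.dropLast.length := by rw [hdl]; omega
        have hi2 : p / 2 < rot.length := by rw [hrotlen]; omega
        rw [List.getD_eq_getElem _ _ hi1, List.getD_eq_getElem _ _ hi2,
          List.getElem_append_right (by simp [hkk]; omega)]
        congr 1
        simp [hkk]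
        omega
      · -- even p: both sides are the original element
        have hcA : ¬ (p % 2 = 1 ∧ 3 ≤ p ∧ p < 2 * (k - 1) + 3) := by
          intro hh; exact hodd hh.1
        have hcB : ¬ (p % 2 = 1 ∧ p / 2 < rot.length) := by
          intro hh; exact hodd hh.1
        rw [if_neg hcA, if_neg hcB]

-- ===== VERDICT (by name: the statement is the Claim_ definition above) =====
theorem swap_odd_list_elements_spec : Claim_equal_swap_odd_list_elements := by
  intro l _
  unfold Spec_swap_odd_list_elements
  exact ports_agree l
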